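-- pv_equiv track=rewrite | github.com/aphoticshaman/HungryOrca | gatorca_phase5_dna_library.py | sobel_edges
-- ===== SOURCE A (Python) =====
-- from typing import List, Dict, Any, Tuple, Set
--
-- Grid = List[List[int]]
--
-- def sobel_edges(g: Grid) -> Grid:
--     """Edge detection (simplified Sobel)"""
--     if not g or not g[0]:
--         return g
--
--     h, w = len(g), len(g[0])
--     result = [[0]*w for _ in range(h)]
--
--     for y in range(1, h-1):
--         for x in range(1, w-1):
--             # Horizontal gradient
--             gx = (g[y-1][x+1] + 2*g[y][x+1] + g[y+1][x+1]) - \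
--                  (g[y-1][x-1] + 2*g[y][x-1] + g[y+1][x-1])
--
--             # Vertical gradient
--             gy = (g[y+1][x-1] + 2*g[y+1][x] + g[y+1][x+1]) - \
--                  (g[y-1][x-1] + 2*g[y-1][x] + g[y-1][x+1])
--
--             # Magnitude
--             magnitude = abs(gx) + abs(gy)
--             result[y][x] = 1 if magnitude > 0 else 0
--
--     return result
-- ===== SOURCE B (Python) =====
-- def sobel_edges(g):
--     """Edge detection (simplified Sobel), computed as a separable convolution."""
--     if not g or not g[0]:
--         return g
--     h, w = len(g), len(g[0])
--     if h < 3 or w < 3: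
--         return [[0] * w for _ in range(h)]
--     # pass 1: central differences along each axis
--     dx = [[row[x + 1] - row[x - 1] if 1 <= x <= w - 2 else 0 for x in range(w)]
--           for row in g]
--     dy = [[g[y + 1][x] - g[y - 1][x] if 1 <= y <= h - 2 else 0 for x in range(w)]
--           for y in range(h)]
--     # pass 2: 1-2-1 smoothing of the differences, then threshold
--     return [[(1 if abs(dx[y - 1][x] + 2 * dx[y][x] + dx[y + 1][x])
--                  + abs(dy[y][x - 1] + 2 * dy[y][x] + dy[y][x + 1]) > 0 else 0)
--              if 1 <= y <= h - 2 and 1 <= x <= w - 2 else 0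
--              for x in range(w)] for y in range(h)]
-- ===== Notes on version B (the rewrite author's own statement) =====
-- stated objective: alternative
-- what changed: Replaces A's single pass that applies the full 3x3 Sobel stencil at each interior pixel of a mutated zero grid by a separable two-pass scheme: first tables of central differences dx and dy are built for the whole grid, then a second pass 1-2-1-smooths three table entries per axis and thresholds, with an early all-zeros return when the grid has no interior.
import Mathlib
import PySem

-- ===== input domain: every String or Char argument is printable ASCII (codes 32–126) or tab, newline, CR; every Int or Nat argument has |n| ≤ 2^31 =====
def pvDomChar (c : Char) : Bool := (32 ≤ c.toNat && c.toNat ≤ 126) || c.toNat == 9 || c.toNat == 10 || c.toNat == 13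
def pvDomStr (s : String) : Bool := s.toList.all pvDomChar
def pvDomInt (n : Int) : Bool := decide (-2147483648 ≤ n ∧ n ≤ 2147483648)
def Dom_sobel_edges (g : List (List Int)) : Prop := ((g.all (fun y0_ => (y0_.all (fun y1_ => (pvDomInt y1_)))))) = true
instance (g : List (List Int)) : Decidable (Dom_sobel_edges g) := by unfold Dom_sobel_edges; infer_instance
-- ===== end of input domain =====

-- B replaces A's single 3x3-stencil scan by two passes of central differences (dx, dy)
-- followed by a 1-2-1 smoothing pass (separable convolution); same return values.

-- ===== PORT A =====
-- g[y][x] with nonnegative in-range indices (Pre_ guarantees in range; default never read)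
def pvGAt (g : List (List Int)) (y x : Nat) : Int := (g.getD y []).getD x 0

-- result[y][x] = v (Python list mutation; loop bounds keep y, x in range)
def pvSetCell (res : List (List Int)) (y x : Nat) (v : Int) : List (List Int) :=
  res.set y ((res.getD y []).set x v)

-- A's loop body: gx, gy, magnitude, threshold
def pvEdge (g : List (List Int)) (y x : Nat) : Int :=
  let gx := (pvGAt g (y-1) (x+1) + 2 * pvGAt g y (x+1) + pvGAt g (y+1) (x+1))
          - (pvGAt g (y-1) (x-1) + 2 * pvGAt g y (x-1) + pvGAt g (y+1) (x-1))
  let gy := (pvGAt g (y+1) (x-1) + 2 * pvGAt g (y+1) x + pvGAt g (y+1) (x+1))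
          - (pvGAt g (y-1) (x-1) + 2 * pvGAt g (y-1) x + pvGAt g (y-1) (x+1))
  let magnitude := |gx| + |gy|
  if magnitude > 0 then 1 else 0

def sobel_edges (g : List (List Int)) : List (List Int) :=
  if g = [] ∨ g.headD [] = [] then g
  else
    (List.range' 1 (g.length - 2)).foldl (fun res y =>
      (List.range' 1 ((g.headD []).length - 2)).foldl (fun res x =>
        pvSetCell res y x (pvEdge g y x)) res)
      (List.replicate g.length (List.replicate (g.headD []).length (0 : Int)))

-- ===== PORT B =====
-- pass 1a: central differences along x of one row
def pvDxRow (w : Nat) (row : List Int) : List Int :=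
  (List.range w).map (fun x =>
    if 1 ≤ x ∧ x ≤ w - 2 then row.getD (x+1) 0 - row.getD (x-1) 0 else 0)

def pvDx (g : List (List Int)) : List (List Int) := g.map (pvDxRow (g.headD []).length)

-- pass 1b: central differences along y
def pvDy (g : List (List Int)) : List (List Int) :=
  (List.range g.length).map (fun y => (List.range (g.headD []).length).map (fun x =>
    if 1 ≤ y ∧ y ≤ g.length - 2 then pvGAt g (y+1) x - pvGAt g (y-1) x else 0))

def sobel_edges_alt (g : List (List Int)) : List (List Int) :=
  if g = [] ∨ g.headD [] = [] then g
  else if g.length < 3 ∨ (g.headD []).length < 3 then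
    List.replicate g.length (List.replicate (g.headD []).length (0 : Int))
  else
    -- pass 2: 1-2-1 smoothing of the differences, then threshold
    (List.range g.length).map (fun y => (List.range (g.headD []).length).map (fun x =>
      if 1 ≤ y ∧ y ≤ g.length - 2 ∧ 1 ≤ x ∧ x ≤ (g.headD []).length - 2 then
        (if |pvGAt (pvDx g) (y-1) x + 2 * pvGAt (pvDx g) y x + pvGAt (pvDx g) (y+1) x|
           + |pvGAt (pvDy g) y (x-1) + 2 * pvGAt (pvDy g) y x + pvGAt (pvDy g) y (x+1)| > 0
         then 1 else 0)
      else 0))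

-- ===== PRECONDITION & SPEC =====
-- Pre_ is exactly where Python A returns: when both loops are non-empty (h ≥ 3, w ≥ 3)
-- A indexes every row at columns 0..w-1, so any row shorter than w raises IndexError.
def Pre_sobel_edges (g : List (List Int)) : Prop :=
  3 ≤ g.length → 3 ≤ (g.headD []).length →
    ∀ row ∈ g, (g.headD []).length ≤ row.length
instance (g : List (List Int)) : Decidable (Pre_sobel_edges g) := by
  unfold Pre_sobel_edges; infer_instance

def pvWitness_sobel_edges : List (List Int) := [[0,0,0],[0,1,0],[0,0,0]]

def Spec_sobel_edges (g : List (List Int)) (out : List (List Int)) : Prop := out = sobel_edges_alt g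
instance (g : List (List Int)) (out : List (List Int)) : Decidable (Spec_sobel_edges g out) := by unfold Spec_sobel_edges; infer_instance

-- ===== CLAIM (what is proved, stated in full; the proofs are below) =====
def Claim_equal_sobel_edges : Prop := ∀ (g : List (List Int)), Dom_sobel_edges g → Pre_sobel_edges g → Spec_sobel_edges g (sobel_edges g)

-- ===== LEMMAS AND PROOFS =====

-- folding `set x (f x)` over a range of indices, read back at i
lemma pv_foldl_set_get? {α : Type} (f : Nat → α) :
    ∀ (n s : Nat) (l : List α) (i : Nat),
      ((List.range' s n).foldl (fun r x => r.set x (f x)) l)[i]? =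
      (l[i]?).map (fun old => if s ≤ i ∧ i < s + n then f i else old) := by
  intro n
  induction n with
  | zero =>
      intro s l i
      simp only [List.range', List.foldl_nil]
      rw [show (fun old : α => if s ≤ i ∧ i < s + 0 then f i else old) = id from
        funext fun old => by rw [if_neg (by omega)]; rfl]
      simp
  | succ n ih =>
      intro s l i
      rw [List.range'_succ, List.foldl_cons, ih (s+1)]
      by_cases hi : i = s
      · subst hi
        rw [List.getElem?_set, if_pos rfl]
        by_cases hl : i < l.length
        · rw [if_pos hl, (List.getElem?_eq_getElem hl : l[i]? = some l[i])]
          simp only [Option.map_some]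
          rw [if_neg (by omega), if_pos (by omega)]
        · rw [if_neg hl, List.getElem?_eq_none (by omega)]
          rfl
      · rw [List.getElem?_set, if_neg (fun h => hi (h.symm))]
        cases l[i]? with
        | none => rfl
        | some v =>
            simp only [Option.map_some, Option.some.injEq]
            by_cases h1 : s + 1 ≤ i ∧ i < s + 1 + n
            · rw [if_pos h1, if_pos (by omega)]
            · rw [if_neg h1, if_neg (by omega)]

-- folding `set y (G y (r.getD y d))` (a row rewrite that reads the old row) over a range
lemma pv_foldl_setG_get? {α : Type} (G : Nat → α → α) (d : α) :
    ∀ (n s : Nat) (l : List α) (i : Nat),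
      ((List.range' s n).foldl (fun r y => r.set y (G y (r.getD y d))) l)[i]? =
      (l[i]?).map (fun old => if s ≤ i ∧ i < s + n then G i old else old) := by
  intro n
  induction n with
  | zero =>
      intro s l i
      simp only [List.range', List.foldl_nil]
      rw [show (fun old : α => if s ≤ i ∧ i < s + 0 then G i old else old) = id from
        funext fun old => by rw [if_neg (by omega)]; rfl]
      simp
  | succ n ih =>
      intro s l i
      rw [List.range'_succ, List.foldl_cons, ih (s+1)]
      by_cases hi : i = s
      · subst hi
        rw [List.getElem?_set, if_pos rfl]
        by_cases hl : i < l.length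
        · rw [if_pos hl, List.getD_eq_getElem _ _ hl,
              (List.getElem?_eq_getElem hl : l[i]? = some l[i])]
          simp only [Option.map_some]
          rw [if_neg (by omega), if_pos (by omega)]
        · rw [if_neg hl, List.getElem?_eq_none (by omega)]
          rfl
      · rw [List.getElem?_set, if_neg (fun h => hi (h.symm))]
        cases l[i]? with
        | none => rfl
        | some v =>
            simp only [Option.map_some, Option.some.injEq]
            by_cases h1 : s + 1 ≤ i ∧ i < s + 1 + n
            · rw [if_pos h1, if_pos (by omega)]
            · rw [if_neg h1, if_neg (by omega)]

-- hoisting: the inner x-loop only ever rewrites row y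
lemma pv_inner_hoist (F : Nat → Int) (y : Nat) :
    ∀ (n s : Nat) (res : List (List Int)),
      (List.range' s n).foldl (fun r x => pvSetCell r y x (F x)) res =
      res.set y ((List.range' s n).foldl (fun row x => row.set x (F x)) (res.getD y [])) := by
  intro n
  induction n with
  | zero =>
      intro s res
      simp only [List.range', List.foldl_nil]
      by_cases hy : y < res.length
      · rw [List.getD_eq_getElem _ _ hy, List.set_getElem_self]
      · rw [List.set_eq_of_length_le (by omega)]
  | succ n ih =>
      intro s res
      rw [List.range'_succ, List.foldl_cons, List.foldl_cons, ih (s+1)]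
      unfold pvSetCell
      rw [List.set_set]
      congr 1
      by_cases hy : y < res.length
      · rw [List.getD_eq_getElem?_getD, List.getElem?_set_self hy]
        rfl
      · have h2 : (res.set y ((res.getD y []).set s (F s))).getD y [] = ([] : List Int) :=
          List.getD_eq_default _ _ (by simpa using (by omega : res.length ≤ y))
        have h1 : res.getD y [] = ([] : List Int) := List.getD_eq_default _ _ (by omega)
        rw [h2, h1, List.set_nil]

-- a cell of a map-over-range row
lemma pv_map_range_get? {α : Type} (f : Nat → α) (w i : Nat) :
    ((List.range w).map f)[i]? = if i < w then some (f i) else none := by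
  by_cases h : i < w
  · rw [List.getElem?_map, List.getElem?_range h]; simp [h]
  · rw [List.getElem?_eq_none (by simpa using (by omega : w ≤ i))]
    rw [if_neg h]

-- reading the dx table inside the grid
lemma pv_gat_dx (g : List (List Int)) (r c : Nat)
    (hr : r < g.length) (hc : c < (g.headD []).length) :
    pvGAt (pvDx g) r c =
      if 1 ≤ c ∧ c ≤ (g.headD []).length - 2
      then pvGAt g r (c+1) - pvGAt g r (c-1) else 0 := by
  show ((pvDx g).getD r []).getD c 0 = _
  have h1 : (pvDx g).getD r [] = pvDxRow (g.headD []).length (g.getD r []) := by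
    unfold pvDx
    rw [List.getD_eq_getElem?_getD, List.getElem?_map,
        (List.getElem?_eq_getElem hr : g[r]? = some g[r]), Option.map_some, Option.getD_some,
        List.getD_eq_getElem _ _ hr]
  rw [h1]
  unfold pvDxRow
  rw [List.getD_eq_getElem?_getD, pv_map_range_get?, if_pos hc, Option.getD_some]
  rfl

-- reading the dy table inside the grid
lemma pv_gat_dy (g : List (List Int)) (r c : Nat)
    (hr : r < g.length) (hc : c < (g.headD []).length) :
    pvGAt (pvDy g) r c =
      if 1 ≤ r ∧ r ≤ g.length - 2
      then pvGAt g (r+1) c - pvGAt g (r-1) c else 0 := by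
  show ((pvDy g).getD r []).getD c 0 = _
  have h1 : (pvDy g).getD r [] = (List.range (g.headD []).length).map (fun x =>
      if 1 ≤ r ∧ r ≤ g.length - 2 then pvGAt g (r+1) x - pvGAt g (r-1) x else 0) := by
    unfold pvDy
    rw [List.getD_eq_getElem?_getD, pv_map_range_get?, if_pos hr, Option.getD_some]
  rw [h1, List.getD_eq_getElem?_getD, pv_map_range_get?, if_pos hc, Option.getD_some]

-- on interior cells A's 3x3 stencil equals B's smoothed central differences
lemma pv_val_eq (g : List (List Int)) (y x : Nat)
    (hy : 1 ≤ y ∧ y ≤ g.length - 2) (hx : 1 ≤ x ∧ x ≤ (g.headD []).length - 2)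
    (h3 : 3 ≤ g.length) (w3 : 3 ≤ (g.headD []).length) :
    pvEdge g y x =
      (if |pvGAt (pvDx g) (y-1) x + 2 * pvGAt (pvDx g) y x + pvGAt (pvDx g) (y+1) x|
         + |pvGAt (pvDy g) y (x-1) + 2 * pvGAt (pvDy g) y x + pvGAt (pvDy g) y (x+1)| > 0
       then 1 else 0) := by
  rw [pv_gat_dx g (y-1) x (by omega) (by omega), pv_gat_dx g y x (by omega) (by omega),
      pv_gat_dx g (y+1) x (by omega) (by omega),
      pv_gat_dy g y (x-1) (by omega) (by omega), pv_gat_dy g y x (by omega) (by omega),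
      pv_gat_dy g y (x+1) (by omega) (by omega),
      if_pos hx, if_pos hx, if_pos hx, if_pos hy, if_pos hy, if_pos hy]
  unfold pvEdge
  have e1 : (pvGAt g (y-1) (x+1) + 2 * pvGAt g y (x+1) + pvGAt g (y+1) (x+1))
          - (pvGAt g (y-1) (x-1) + 2 * pvGAt g y (x-1) + pvGAt g (y+1) (x-1))
      = (pvGAt g (y-1) (x+1) - pvGAt g (y-1) (x-1))
        + 2 * (pvGAt g y (x+1) - pvGAt g y (x-1))
        + (pvGAt g (y+1) (x+1) - pvGAt g (y+1) (x-1)) := by ring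
  have e2 : (pvGAt g (y+1) (x-1) + 2 * pvGAt g (y+1) x + pvGAt g (y+1) (x+1))
          - (pvGAt g (y-1) (x-1) + 2 * pvGAt g (y-1) x + pvGAt g (y-1) (x+1))
      = (pvGAt g (y+1) (x-1) - pvGAt g (y-1) (x-1))
        + 2 * (pvGAt g (y+1) x - pvGAt g (y-1) x)
        + (pvGAt g (y+1) (x+1) - pvGAt g (y-1) (x+1)) := by ring
  rw [e1, e2]

-- ===== VERDICT (by name: the statement is the Claim_ definition above) =====
theorem sobel_edges_spec : Claim_equal_sobel_edges := by
  intro g _ _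
  unfold Spec_sobel_edges sobel_edges sobel_edges_alt
  by_cases hg : g = [] ∨ g.headD [] = []
  · rw [if_pos hg, if_pos hg]
  · rw [if_neg hg, if_neg hg]
    by_cases hsmall : g.length < 3 ∨ (g.headD []).length < 3
    · rw [if_pos hsmall]
      rcases hsmall with hh | hw
      · rw [(by omega : g.length - 2 = 0)]
        rfl
      · rw [(by omega : (g.headD []).length - 2 = 0)]
        simp only [List.range', List.foldl_nil]
        exact List.foldl_fixed _
    · rw [if_neg hsmall]
      have h3 : 3 ≤ g.length := by omega
      have w3 : 3 ≤ (g.headD []).length := by omega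
      rw [show (fun (res : List (List Int)) (y : Nat) =>
            (List.range' 1 ((g.headD []).length - 2)).foldl (fun res x =>
              pvSetCell res y x (pvEdge g y x)) res) =
          (fun (res : List (List Int)) (y : Nat) => res.set y
            ((List.range' 1 ((g.headD []).length - 2)).foldl (fun row x =>
              row.set x (pvEdge g y x)) (res.getD y []))) from
        funext fun res => funext fun y => pv_inner_hoist (pvEdge g y) y _ 1 res]
      apply List.ext_getElem?
      intro i
      rw [pv_foldl_setG_get? (fun y old =>
            (List.range' 1 ((g.headD []).length - 2)).foldl (fun row x =>
              row.set x (pvEdge g y x)) old) [] (g.length - 2) 1 _ i,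
          List.getElem?_replicate, pv_map_range_get?]
      by_cases hi : i < g.length
      · rw [if_pos hi, if_pos hi, Option.map_some]
        congr 1
        apply List.ext_getElem?
        intro j
        by_cases hyi : 1 ≤ i ∧ i < 1 + (g.length - 2)
        · rw [if_pos hyi, pv_foldl_set_get?, List.getElem?_replicate, pv_map_range_get?]
          by_cases hj : j < (g.headD []).length
          · rw [if_pos hj, if_pos hj, Option.map_some]
            congr 1
            by_cases hxj : 1 ≤ j ∧ j < 1 + ((g.headD []).length - 2)
            · rw [if_pos hxj, if_pos (by omega : 1 ≤ i ∧ i ≤ g.length - 2 ∧ 1 ≤ j ∧ j ≤ (g.headD []).length - 2)]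
              exact pv_val_eq g i j (by omega) (by omega) h3 w3
            · rw [if_neg hxj, if_neg (by omega :
                ¬(1 ≤ i ∧ i ≤ g.length - 2 ∧ 1 ≤ j ∧ j ≤ (g.headD []).length - 2))]
          · rw [if_neg hj, if_neg hj]
            rfl
        · rw [if_neg hyi, List.getElem?_replicate, pv_map_range_get?]
          by_cases hj : j < (g.headD []).length
          · rw [if_pos hj, if_pos hj, if_neg (by omega :
              ¬(1 ≤ i ∧ i ≤ g.length - 2 ∧ 1 ≤ j ∧ j ≤ (g.headD []).length - 2))]
          · rw [if_neg hj, if_neg hj]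
      · rw [if_neg hi, if_neg hi]
        rfl
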